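-- pv_equiv track=rewrite | github.com/ameforce/windows-supporter | src/apps/Notion.py | _try_parse_bullet_line
-- ===== SOURCE A (Python) =====
-- def _try_parse_bullet_line(line: str):
--     indent = 0
--     i = 0
--     n = len(line)
--     while i < n:
--         ch = line[i]
--         if ch == "\t":
--             indent += 4
--             i += 1
--             continue
--         if ch == " " or ch == "\u00A0":
--             indent += 1
--             i += 1
--             continue
--         try:
--             if ch.isspace():
--                 indent += 1
--                 i += 1
--                 continue
--         except Exception:
--             pass
--         break
--     rest = line[i:]
--     if rest.startswith("- "):
--         return indent, rest[2:].rstrip()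
--     if rest.startswith("\u2022 "):
--         return indent, rest[2:].rstrip()
--     if rest.startswith("* "):
--         return indent, rest[2:].rstrip()
--     return None, None
-- ===== SOURCE B (Python) =====
-- def _try_parse_bullet_line(line: str):
--     stripped = line.lstrip()
--     i = len(line) - len(stripped)
--     prefix = line[:i]
--     tabs = prefix.count("\t")
--     indent = tabs * 4 + (i - tabs)
--     for marker in ("- ", "\u2022 ", "* "):
--         if stripped.startswith(marker):
--             return indent, stripped[2:].rstrip()
--     return None, None
-- ===== Notes on version B (the rewrite author's own statement) =====
-- stated objective: simpler
-- what changed: Replaced the explicit character-scanning while-loop (with its tab/space/isspace branch chain) by a closed-form computation: lstrip gives the whitespace boundary, the indent is derived arithmetically from the prefix length and its tab count, and a single loop over the three markers replaces the startswith chain.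
import Mathlib
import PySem

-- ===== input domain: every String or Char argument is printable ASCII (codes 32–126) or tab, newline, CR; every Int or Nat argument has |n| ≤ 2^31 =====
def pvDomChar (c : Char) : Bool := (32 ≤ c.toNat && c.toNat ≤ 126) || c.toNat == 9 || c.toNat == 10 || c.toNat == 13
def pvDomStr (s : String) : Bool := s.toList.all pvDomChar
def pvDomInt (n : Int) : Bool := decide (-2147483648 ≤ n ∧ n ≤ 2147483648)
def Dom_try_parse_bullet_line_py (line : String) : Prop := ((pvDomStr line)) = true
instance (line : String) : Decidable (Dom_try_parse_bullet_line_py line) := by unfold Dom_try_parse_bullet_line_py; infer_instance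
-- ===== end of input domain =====

-- B replaces A's explicit whitespace-scanning loop by lstrip + a closed-form indent from the
-- prefix length and its tab count (objective: simpler decomposition; same asymptotic cost).

-- ===== PORT A =====
-- A's while loop: scan leading whitespace, tab counts 4, every other whitespace char counts 1.
def pvGoA : Int → List Char → Int × List Char
  | ind, [] => (ind, [])
  | ind, c :: rest =>
    if c = '\t' then pvGoA (ind + 4) rest
    else if c = ' ' ∨ c = '\u00A0' then pvGoA (ind + 1) rest
    else if PySem.Chars.isspace c then pvGoA (ind + 1) rest
    else (ind, c :: rest)

def pvACore (cs : List Char) : Option Int × Option String :=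
  let r := pvGoA 0 cs
  let indent := r.1
  let rest := r.2
  if PySem.Chars.startswith rest ['-', ' '] then
    (some indent, some (String.ofList (PySem.Chars.rstrip (rest.drop 2))))
  else if PySem.Chars.startswith rest ['\u2022', ' '] then
    (some indent, some (String.ofList (PySem.Chars.rstrip (rest.drop 2))))
  else if PySem.Chars.startswith rest ['*', ' '] then
    (some indent, some (String.ofList (PySem.Chars.rstrip (rest.drop 2))))
  else (none, none)

def try_parse_bullet_line_py (line : String) : Option Int × Option String :=
  pvACore line.toList

-- ===== PORT B =====
def pvBCore (cs : List Char) : Option Int × Option String :=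
  let stripped := PySem.Chars.lstrip cs
  let i : Int := (cs.length : Int) - (stripped.length : Int)
  let pre := PySem.List.slice cs none (some i)        -- line[:i]
  let tabs : Int := (pre.count '\t' : Int)
  let indent := tabs * 4 + (i - tabs)
  match (["- ", "\u2022 ", "* "] : List String).find?
      (fun m => PySem.Chars.startswith stripped m.toList) with
  | some _ => (some indent, some (String.ofList (PySem.Chars.rstrip (stripped.drop 2))))
  | none => (none, none)

def try_parse_bullet_line_py_alt (line : String) : Option Int × Option String :=
  pvBCore line.toList

-- ===== PRECONDITION & SPEC =====
def Spec_try_parse_bullet_line_py (line : String) (out : Option Int × Option String) : Prop := out = try_parse_bullet_line_py_alt line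
instance (line : String) (out : Option Int × Option String) : Decidable (Spec_try_parse_bullet_line_py line out) := by unfold Spec_try_parse_bullet_line_py; infer_instance

-- ===== CLAIM (what is proved, stated in full; the proofs are below) =====
def Claim_equal_try_parse_bullet_line_py : Prop := ∀ (line : String), Dom_try_parse_bullet_line_py line → Spec_try_parse_bullet_line_py line (try_parse_bullet_line_py line)

-- ===== LEMMAS AND PROOFS =====

-- The indentation value both programs compute from a whitespace prefix l.
def pvIndentOf (l : List Char) : Int :=
  4 * (l.count '\t' : Int) + ((l.length : Int) - (l.count '\t' : Int))

lemma pvIndentOf_cons_tab (l : List Char) : pvIndentOf ('\t' :: l) = 4 + pvIndentOf l := by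
  simp [pvIndentOf]
  omega

lemma pvIndentOf_cons_ne (c : Char) (l : List Char) (h : c ≠ '\t') :
    pvIndentOf (c :: l) = 1 + pvIndentOf l := by
  have hc : l.count '\t' ≤ l.length := List.count_le_length
  simp [pvIndentOf, h]
  omega

lemma pvGoA_eq (cs : List Char) (ind : Int) :
    pvGoA ind cs =
      (ind + pvIndentOf (cs.takeWhile PySem.Chars.isspace),
       cs.dropWhile PySem.Chars.isspace) := by
  induction cs generalizing ind with
  | nil => simp [pvGoA, pvIndentOf]
  | cons c rest ih =>
    by_cases hsp : PySem.Chars.isspace c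
    · rw [List.takeWhile_cons_of_pos hsp, List.dropWhile_cons_of_pos hsp]
      by_cases ht : c = '\t'
      · subst ht
        rw [pvIndentOf_cons_tab]
        simp [pvGoA, ih]
        ring_nf
      · have h1 : pvIndentOf (c :: List.takeWhile PySem.Chars.isspace rest)
            = 1 + pvIndentOf (List.takeWhile PySem.Chars.isspace rest) :=
          pvIndentOf_cons_ne _ _ ht
        by_cases hs : c = ' ' ∨ c = '\u00A0'
        · simp only [pvGoA, if_neg ht, if_pos hs, ih, h1]
          ring_nf
        · simp only [pvGoA, if_neg ht, if_neg hs, if_pos hsp, ih, h1]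
          ring_nf
    · have ht : c ≠ '\t' := by rintro rfl; exact hsp (by decide)
      have hs : ¬ (c = ' ' ∨ c = '\u00A0') := by
        rintro (rfl | rfl) <;> exact hsp (by decide)
      rw [List.takeWhile_cons_of_neg (by simpa using hsp),
          List.dropWhile_cons_of_neg (by simpa using hsp)]
      simp [pvGoA, ht, hs, hsp, pvIndentOf]

lemma pvLstrip_split (cs : List Char) :
    cs.takeWhile PySem.Chars.isspace ++ PySem.Chars.lstrip cs = cs := by
  simp [PySem.Chars.lstrip]

lemma pvLstrip_len (cs : List Char) :
    (cs.takeWhile PySem.Chars.isspace).length + (PySem.Chars.lstrip cs).length = cs.length := by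
  have := congrArg List.length (pvLstrip_split cs)
  simpa [List.length_append] using this

-- B's prefix line[:len(line)-len(stripped)] is exactly the whitespace prefix A scans.
lemma pvSlice_eq_takeWhile (cs : List Char) :
    PySem.List.slice cs none (some ((cs.length : Int) - ((PySem.Chars.lstrip cs).length : Int)))
      = cs.takeWhile PySem.Chars.isspace := by
  have hlen := pvLstrip_len cs
  have hi : (0 : Int) ≤ (cs.length : Int) - ((PySem.Chars.lstrip cs).length : Int) := by omega
  rw [PySem.List.slice_to _ hi]
  have htoNat : ((cs.length : Int) - ((PySem.Chars.lstrip cs).length : Int)).toNat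
      = (cs.takeWhile PySem.Chars.isspace).length := by omega
  rw [htoNat]
  nth_rewrite 2 [← pvLstrip_split cs]
  exact List.take_left

lemma pvCore_eq (cs : List Char) : pvACore cs = pvBCore cs := by
  unfold pvACore pvBCore
  simp only [pvGoA_eq, zero_add, pvSlice_eq_takeWhile]
  have hind : ((cs.takeWhile PySem.Chars.isspace).count '\t' : Int) * 4 +
      ((cs.length : Int) - ((PySem.Chars.lstrip cs).length : Int)
        - ((cs.takeWhile PySem.Chars.isspace).count '\t' : Int))
      = pvIndentOf (cs.takeWhile PySem.Chars.isspace) := by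
    have hlen := pvLstrip_len cs
    unfold pvIndentOf
    omega
  rw [hind]
  have hrest : cs.dropWhile PySem.Chars.isspace = PySem.Chars.lstrip cs := rfl
  rw [hrest]
  set rest := PySem.Chars.lstrip cs with hr
  by_cases h1 : PySem.Chars.startswith rest ['-', ' ']
  · simp [List.find?, h1]
  · by_cases h2 : PySem.Chars.startswith rest ['\u2022', ' ']
    · simp [List.find?, h1, h2]
    · by_cases h3 : PySem.Chars.startswith rest ['*', ' ']
      · simp [List.find?, h1, h2, h3]
      · simp [List.find?, h1, h2, h3]

-- ===== VERDICT (by name: the statement is the Claim_ definition above) =====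
theorem try_parse_bullet_line_py_spec : Claim_equal_try_parse_bullet_line_py := by
  intro line _
  unfold Spec_try_parse_bullet_line_py try_parse_bullet_line_py try_parse_bullet_line_py_alt
  exact pvCore_eq line.toList
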